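-- pv_equiv track=rewrite | github.com/JAerens/BayesianGeneralization | EAR_Clean_Code_Final.py | contextual_diversity_window
-- ===== SOURCE A (Python) =====
-- def contextual_diversity_window(all_words_dictionary, entire_corpus_text_as_a_list, window_size):
--     '''calculating the number of unique words that appear around each word in the corpus in a given window size (you set it as input before the program runs)'''
--
--     cd_dict = {} #a dictionary where each key is a word in the corpus, and each value is the list of words that co-occur in the window with that word
--     for word in list(all_words_dictionary.keys()): #a dictionary of all the unique words in the corpus, so the keys are your types
--         cd_dict[word] = 0 #initialize all counts of how many words are in the window with the word you're currently looking at at zero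
--
--     for word_in_dict in list(all_words_dictionary.keys()): #all the types in the entire corpus
--         cd_list = [] #list of the words
--         indices = [] #list of the indicies
--         for index, word_in_list in enumerate(entire_corpus_text_as_a_list): #takes the entire corpus and turns the words into tuples of (the index, the word)
--             if word_in_list == word_in_dict: #as you iterate through the corpus, if the word you're on in the list matches the word you're on in the entire types dictionary
--                 indices.append(index) #add the index of that word in the entire tokens corpus to the list
--         for index in indices: #so for all the indicies in the corpus where the word you're lookat at appears
--             window_list = entire_corpus_text_as_a_list[index-window_size: index+window_size] #get the words in the window around the word you're looking at
--             for each_word in window_list: #for each of those words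
--                 if each_word not in cd_list: #if they're not in the contextual diversity list
--                     cd_list.append(each_word) #add them, giving you the total number of different words that appears in the whatever-sized window around any instance of the word you're looking at
--
--         cd_dict[word_in_dict] = len(cd_list) #should be a dictionary of each word in the corpus and the number of words that co-occur with it
--
--     return cd_dict
-- ===== SOURCE B (Python) =====
-- def contextual_diversity_window(all_words_dictionary, entire_corpus_text_as_a_list, window_size):
--     '''One pass to index word occurrences, then a set union over the windows per word.'''
--     corpus = entire_corpus_text_as_a_list
--     positions = {}
--     for i, w in enumerate(corpus):
--         positions.setdefault(w, []).append(i)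
--     result = {}
--     for word in all_words_dictionary:
--         seen = set()
--         for i in positions.get(word, []):
--             seen.update(corpus[i - window_size: i + window_size])
--         result[word] = len(seen)
--     return result
-- ===== Notes on version B (the rewrite author's own statement) =====
-- stated objective: faster
-- what changed: Instead of rescanning the whole corpus once per dictionary word to collect its indices, B builds a word->indices dict in one pass over the corpus and then, per word, unions the window slices into a set.
import Mathlib
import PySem

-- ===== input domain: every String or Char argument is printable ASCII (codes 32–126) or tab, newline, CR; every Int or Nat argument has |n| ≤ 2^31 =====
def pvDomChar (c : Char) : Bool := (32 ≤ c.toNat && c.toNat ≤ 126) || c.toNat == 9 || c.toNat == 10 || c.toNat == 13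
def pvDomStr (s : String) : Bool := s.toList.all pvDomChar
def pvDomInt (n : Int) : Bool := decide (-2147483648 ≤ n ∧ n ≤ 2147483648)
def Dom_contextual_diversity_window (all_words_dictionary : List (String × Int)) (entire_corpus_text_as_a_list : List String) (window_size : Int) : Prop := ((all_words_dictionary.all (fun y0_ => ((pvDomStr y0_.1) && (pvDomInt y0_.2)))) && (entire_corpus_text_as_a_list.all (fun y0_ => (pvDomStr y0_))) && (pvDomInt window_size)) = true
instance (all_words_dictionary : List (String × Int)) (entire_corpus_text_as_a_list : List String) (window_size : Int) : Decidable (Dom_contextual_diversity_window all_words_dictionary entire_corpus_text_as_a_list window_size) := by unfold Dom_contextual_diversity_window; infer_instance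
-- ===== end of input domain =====

-- B replaces A's per-word rescan of the corpus by a single indexing pass plus per-word set unions (faster).

-- ===== PORT A =====
def contextual_diversity_window (all_words_dictionary : List (String × Int)) (entire_corpus_text_as_a_list : List String) (window_size : Int) : List (String × Int) :=
  let keysL := PySem.Dict.keys (PySem.Dict.mk all_words_dictionary)
  -- cd_dict = {}; for word in keys: cd_dict[word] = 0
  let cd0 : PySem.Dict String Int := keysL.foldl (fun cd word => cd.insert word 0) PySem.Dict.empty
  -- second loop over the keys
  let res : PySem.Dict String Int := keysL.foldl (fun cd word_in_dict =>
    -- indices = []; for index, word_in_list in enumerate(corpus): if word_in_list == word_in_dict: indices.append(index)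
    let indices : List Int := (PySem.List.enumerate entire_corpus_text_as_a_list 0).foldl
      (fun acc p => if p.2 == word_in_dict then acc ++ [p.1] else acc) []
    -- cd_list = []; for index in indices: for each_word in corpus[index-ws:index+ws]: if each_word not in cd_list: cd_list.append(each_word)
    let cd_list : List String := indices.foldl (fun cl index =>
      (PySem.List.slice entire_corpus_text_as_a_list (some (index - window_size)) (some (index + window_size))).foldl
        (fun cl2 each_word => if cl2.contains each_word then cl2 else cl2 ++ [each_word]) cl) []
    cd.insert word_in_dict (cd_list.length : Int)) cd0
  res.items

-- ===== PORT B =====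
def contextual_diversity_window_alt (all_words_dictionary : List (String × Int)) (entire_corpus_text_as_a_list : List String) (window_size : Int) : List (String × Int) :=
  -- positions = {}; for i, w in enumerate(corpus): positions.setdefault(w, []).append(i)
  let positions : PySem.Dict String (List Int) :=
    (PySem.List.enumerate entire_corpus_text_as_a_list 0).foldl
      (fun p q => p.modify q.2 [] (fun l => l ++ [q.1])) PySem.Dict.empty
  -- result = {}; for word in dict: seen = set(); for i in positions.get(word, []): seen.update(corpus[i-ws:i+ws]); result[word] = len(seen)
  let res : PySem.Dict String Int :=
    (PySem.Dict.keys (PySem.Dict.mk all_words_dictionary)).foldl (fun r word =>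
      let seen : PySem.Set String := (positions.getD word []).foldl
        (fun s i => PySem.Set.update s (PySem.List.slice entire_corpus_text_as_a_list (some (i - window_size)) (some (i + window_size)))) PySem.Set.empty
      r.insert word (PySem.Set.len seen)) PySem.Dict.empty
  res.items

-- ===== PRECONDITION & SPEC =====
def Spec_contextual_diversity_window (all_words_dictionary : List (String × Int)) (entire_corpus_text_as_a_list : List String) (window_size : Int) (out : List (String × Int)) : Prop := out = contextual_diversity_window_alt all_words_dictionary entire_corpus_text_as_a_list window_size
instance (all_words_dictionary : List (String × Int)) (entire_corpus_text_as_a_list : List String) (window_size : Int) (out : List (String × Int)) : Decidable (Spec_contextual_diversity_window all_words_dictionary entire_corpus_text_as_a_list window_size out) := by unfold Spec_contextual_diversity_window; infer_instance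

-- ===== CLAIM (what is proved, stated in full; the proofs are below) =====
def Claim_equal_contextual_diversity_window : Prop := ∀ (all_words_dictionary : List (String × Int)) (entire_corpus_text_as_a_list : List String) (window_size : Int), Dom_contextual_diversity_window all_words_dictionary entire_corpus_text_as_a_list window_size → Spec_contextual_diversity_window all_words_dictionary entire_corpus_text_as_a_list window_size (contextual_diversity_window all_words_dictionary entire_corpus_text_as_a_list window_size)

-- ===== LEMMAS AND PROOFS =====


lemma insert_graph (l : List String) (g : String → Int) (w : String) (v : Int) :
    (PySem.Dict.mk (l.map (fun k => (k, g k)))).insert w v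
      = PySem.Dict.mk ((PySem.Set.add l w).map (fun k => (k, if k = w then v else g k))) := by
  by_cases h : w ∈ l
  · have hc : (PySem.Dict.mk (l.map (fun k => (k, g k)))).contains w = true := by
      simp [PySem.Dict.contains]; exact h
    have hs : PySem.Set.contains l w = true := by simpa [PySem.Set.contains] using h
    simp only [PySem.Dict.insert, PySem.Set.add, hc, hs, if_true, List.map_map]
    congr 1
    apply List.map_congr_left
    intro k _
    by_cases hk : k = w
    · subst hk; simp
    · simp [hk, Function.comp]
  · have hc : (PySem.Dict.mk (l.map (fun k => (k, g k)))).contains w = false := by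
      simp [PySem.Dict.contains]; intro a ha e; exact h (e ▸ ha)
    have hs : PySem.Set.contains l w = false := by simpa [PySem.Set.contains] using h
    simp only [PySem.Dict.insert, PySem.Set.add, hc, hs, Bool.false_eq_true, if_false,
      List.map_append, List.map_cons, List.map_nil, if_true]
    congr 1
    refine congrArg (· ++ [(w, v)]) ?_
    apply List.map_congr_left
    intro k hk
    have : k ≠ w := fun e => h (e ▸ hk)
    simp [this]

lemma foldl_insert_graph (ks : List String) (l : List String) (g f : String → Int) :
    ks.foldl (fun cd ww => cd.insert ww (f ww)) (PySem.Dict.mk (l.map (fun k => (k, g k))))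
      = PySem.Dict.mk ((ks.foldl PySem.Set.add l).map (fun k => (k, if k ∈ ks then f k else g k))) := by
  induction ks generalizing l g with
  | nil => simp
  | cons w ks ih =>
    simp only [List.foldl_cons]
    rw [insert_graph l g w (f w), ih (PySem.Set.add l w) (fun k => if k = w then f w else g k)]
    congr 1
    apply List.map_congr_left
    intro k _
    by_cases h1 : k ∈ ks
    · simp [h1]
    · by_cases h2 : k = w
      · subst h2; simp [h1]
      · simp [h1, h2]

lemma foldl_add_of_subset (ks S : List String) (h : ∀ k ∈ ks, k ∈ S) :
    ks.foldl PySem.Set.add S = S := by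
  induction ks with
  | nil => rfl
  | cons k ks ih =>
    have hk : PySem.Set.add S k = S := by
      simp [PySem.Set.add, PySem.Set.contains]; exact h k (by simp)
    simp only [List.foldl_cons, hk]
    exact ih (fun x hx => h x (by simp [hx]))

lemma indices_eq (corpus : List String) (word : String) :
    (((PySem.List.enumerate corpus 0).foldl (fun p q => p.modify q.2 [] (fun l => l ++ [q.1])) PySem.Dict.empty).getD word [])
      = (PySem.List.enumerate corpus 0).foldl (fun acc p => if p.2 == word then acc ++ [p.1] else acc) [] := by
  have h1 : ((PySem.List.enumerate corpus 0).foldl (fun p q => p.modify q.2 [] (fun l => l ++ [q.1])) PySem.Dict.empty)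
      = (((PySem.List.enumerate corpus 0).map (fun q => (q.2, q.1))).foldl (fun d p => d.modify p.1 [] (fun l => l ++ [p.2])) PySem.Dict.empty) := by
    rw [List.foldl_map]
  rw [h1, PySem.Dict.getD_foldl_modify_append]
  conv_rhs => rw [PySem.List.foldl_append_if (fun q : Int × String => q.2 == word) (fun q : Int × String => q.1) (PySem.List.enumerate corpus) []]
  rw [List.filter_map, List.map_map]
  simp [Function.comp_def]

lemma main_core (ks : List String) (F G : String → Int) (h : ∀ w, F w = G w) :
    (ks.foldl (fun cd w => cd.insert w (F w)) (ks.foldl (fun cd w => cd.insert w (0:Int)) PySem.Dict.empty)).items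
      = (ks.foldl (fun r w => r.insert w (G w)) PySem.Dict.empty).items := by
  have hF : F = G := funext h
  subst hF
  have hempty : (PySem.Dict.empty : PySem.Dict String Int) = PySem.Dict.mk (([] : List String).map (fun k => (k, (0:Int)))) := rfl
  have h0 : (ks.foldl (fun cd w => cd.insert w (0:Int)) PySem.Dict.empty)
      = PySem.Dict.mk ((ks.foldl PySem.Set.add []).map (fun k => (k, (0:Int)))) := by
    rw [hempty, foldl_insert_graph ks [] (fun _ => 0) (fun _ => 0)]
    simp
  have hsub : ks.foldl PySem.Set.add [] = PySem.Set.ofList ks := (PySem.Set.ofList_eq_foldl ks).symm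
  rw [h0, foldl_insert_graph ks (ks.foldl PySem.Set.add []) (fun _ => 0) F,
      foldl_add_of_subset ks (ks.foldl PySem.Set.add []) (by intro k hk; rw [hsub]; exact (PySem.Set.mem_ofList ks k).mpr hk)]
  have hrhs : (ks.foldl (fun r w => r.insert w (F w)) PySem.Dict.empty)
      = PySem.Dict.mk ((ks.foldl PySem.Set.add []).map (fun k => (k, F k))) := by
    rw [show (PySem.Dict.empty : PySem.Dict String Int) = PySem.Dict.mk (([] : List String).map (fun k => (k, F k))) from rfl,
        foldl_insert_graph ks [] F F]
    simp
  rw [hrhs]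
  congr 1
  congr 1
  apply List.map_congr_left
  intro k hk
  have : k ∈ ks := by rw [hsub] at hk; exact (PySem.Set.mem_ofList ks k).mp hk
  simp [this]



-- ===== VERDICT (by name: the statement is the Claim_ definition above) =====
theorem contextual_diversity_window_spec : Claim_equal_contextual_diversity_window := by
  intro awd corpus ws _hDom
  simp only [Spec_contextual_diversity_window, contextual_diversity_window, contextual_diversity_window_alt]
  simp only [PySem.Set.update, PySem.Set.len, PySem.Set.empty]
  apply main_core
  intro word
  rw [indices_eq corpus word]
  rfl
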